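-- pv_equiv track=rewrite | github.com/bztbzt/myTextEE | TextEE/models/OneIE/data.py | get_coref_types
-- ===== SOURCE A (Python) =====
-- import copy, itertools, json, logging
-- from collections import Counter, namedtuple, defaultdict
--
-- def get_coref_types(entities):
--     entity_num = len(entities)
--     labels = [['O'] * entity_num for _ in range(entity_num)]
--     clusters = defaultdict(list)
--     for i, entity in enumerate(entities):
--         entity_id = entity['entity_id']
--         cluster_id = entity_id[:entity_id.rfind('-')]
--         clusters[cluster_id].append(i)
--     for _, entities in clusters.items():
--         for i, j in itertools.combinations(entities, 2):
--             labels[i][j] = 'COREF'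
--             labels[j][i] = 'COREF'
--     return labels
-- ===== SOURCE B (Python) =====
-- def get_coref_types(entities):
--     cluster_ids = [e['entity_id'][:e['entity_id'].rfind('-')] for e in entities]
--     n = len(cluster_ids)
--     return [['COREF' if i != j and cluster_ids[i] == cluster_ids[j] else 'O'
--              for j in range(n)]
--             for i in range(n)]
-- ===== Notes on version B (the rewrite author's own statement) =====
-- stated objective: simpler
-- what changed: B precomputes the cluster id of every entity once and builds the matrix directly with a comprehension deciding each cell by comparing cluster ids, instead of grouping indices in a defaultdict and mutating an 'O' matrix over itertools.combinations of each group.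
import Mathlib
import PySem

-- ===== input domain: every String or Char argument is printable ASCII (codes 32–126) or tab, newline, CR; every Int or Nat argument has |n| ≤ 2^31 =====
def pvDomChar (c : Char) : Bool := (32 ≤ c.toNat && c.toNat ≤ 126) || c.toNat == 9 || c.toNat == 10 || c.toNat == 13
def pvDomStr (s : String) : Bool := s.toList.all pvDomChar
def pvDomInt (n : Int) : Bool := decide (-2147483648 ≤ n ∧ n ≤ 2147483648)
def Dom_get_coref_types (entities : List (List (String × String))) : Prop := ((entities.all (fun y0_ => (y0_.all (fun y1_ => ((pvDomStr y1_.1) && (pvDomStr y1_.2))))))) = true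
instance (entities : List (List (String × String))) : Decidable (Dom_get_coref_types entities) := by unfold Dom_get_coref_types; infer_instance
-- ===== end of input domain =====

-- B builds the matrix directly by comparing precomputed cluster ids per cell (a comprehension),
-- instead of A's defaultdict grouping plus mutation over itertools.combinations; objective: simpler.

-- ===== PORT A =====
-- shared by both ports: both Pythons contain the identical expression
-- e['entity_id'][:e['entity_id'].rfind('-')]
def pvClusterId (e : List (String × String)) : String :=
  let entity_id := (PySem.Dict.ofList e).getD "entity_id" ""
  PySem.Str.slice entity_id none (some (PySem.Str.rfind entity_id "-"))

-- labels[i][j] = 'COREF'  (row read, row write, matrix write)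
def pvSetCoref (labels : List (List String)) (i j : Int) : List (List String) :=
  PySem.List.pySetD labels i (PySem.List.pySetD (PySem.List.pyGetD labels i []) j "COREF")

def get_coref_types (entities : List (List (String × String))) : List (List String) :=
  let entity_num := entities.length
  let labels : List (List String) := List.replicate entity_num (List.replicate entity_num "O")
  let clusters : PySem.Dict String (List Int) :=
    (PySem.List.enumerate entities).foldl
      (fun d p => d.modify (pvClusterId p.2) [] (· ++ [p.1])) PySem.Dict.empty
  clusters.items.foldl
    (fun labels pr =>
      (PySem.List.combinations pr.2 2).foldl
        (fun labels c =>
          match c with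
          | [i, j] => pvSetCoref (pvSetCoref labels i j) j i
          | _ => labels) labels) labels

-- ===== PORT B =====
def get_coref_types_alt (entities : List (List (String × String))) : List (List String) :=
  let cluster_ids := entities.map pvClusterId
  let n := cluster_ids.length
  (List.range n).map (fun i =>
    (List.range n).map (fun j =>
      if i ≠ j ∧ cluster_ids.getD i "" = cluster_ids.getD j "" then "COREF" else "O"))

-- ===== PRECONDITION & SPEC =====
-- Pre_ excludes exactly the inputs where e['entity_id'] raises KeyError (an entity without that key).
def Pre_get_coref_types (entities : List (List (String × String))) : Prop :=
  ∀ e ∈ entities, (PySem.Dict.ofList e).contains "entity_id" = true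
instance (entities : List (List (String × String))) : Decidable (Pre_get_coref_types entities) := by unfold Pre_get_coref_types; infer_instance

def pvWitness_get_coref_types : (List (List (String × String))) :=
  [[("entity_id", "c-1")], [("entity_id", "c-2")], [("entity_id", "c-3")]]

def Spec_get_coref_types (entities : List (List (String × String))) (out : List (List String)) : Prop := out = get_coref_types_alt entities
instance (entities : List (List (String × String))) (out : List (List String)) : Decidable (Spec_get_coref_types entities out) := by unfold Spec_get_coref_types; infer_instance

-- ===== CLAIM (what is proved, stated in full; the proofs are below) =====
def Claim_equal_get_coref_types : Prop := ∀ (entities : List (List (String × String))), Dom_get_coref_types entities → Pre_get_coref_types entities → Spec_get_coref_types entities (get_coref_types entities)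

-- ===== LEMMAS AND PROOFS =====

-- matrix entry read, proof-side
def pvEntry (M : List (List String)) (a b : Nat) : String := (M.getD a []).getD b ""

-- the inner write step of A's second loop, proof-side name for the port's lambda
def pvStep (labels : List (List String)) (c : List Int) : List (List String) :=
  match c with
  | [i, j] => pvSetCoref (pvSetCoref labels i j) j i
  | _ => labels

def pvDims (n : Nat) (M : List (List String)) : Prop :=
  M.length = n ∧ ∀ r ∈ M, r.length = n

-- the index list A's dict holds at key c, in closed form
def pvGroup (entities : List (List (String × String))) (c : String) : List Int :=
  ((PySem.List.enumerate entities).filter (fun p => pvClusterId p.2 == c)).map (·.1)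

-- the dict built by A's first loop
def pvClusters (entities : List (List (String × String))) : PySem.Dict String (List Int) :=
  (PySem.List.enumerate entities).foldl
    (fun d p => d.modify (pvClusterId p.2) [] (· ++ [p.1])) PySem.Dict.empty

-- the flattened pair list of A's second loop
def pvPairs (entities : List (List (String × String))) : List (List Int) :=
  (pvClusters entities).items.flatMap (fun pr => PySem.List.combinations pr.2 2)

lemma pvGetD_set {α : Type} (l : List α) (i a : Nat) (v d : α) :
    (l.set i v).getD a d = if i = a ∧ i < l.length then v else l.getD a d := by
  rw [List.getD_eq_getElem?_getD, List.getElem?_set, List.getD_eq_getElem?_getD]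
  split_ifs with h1 h2 h3 <;> simp_all; omega

lemma pvSetCoref_eq (M : List (List String)) (i j : Nat) :
    pvSetCoref M (i : Int) (j : Int) = M.set i ((M.getD i []).set j "COREF") := by
  simp [pvSetCoref]

lemma pvSetCoref_dims {n : Nat} {M : List (List String)} (h : pvDims n M)
    {i : Nat} (hi : i < n) (j : Nat) : pvDims n (pvSetCoref M (i : Int) (j : Int)) := by
  obtain ⟨hl, hr⟩ := h
  rw [pvSetCoref_eq]
  refine ⟨by simpa using hl, ?_⟩
  intro r hrm
  rcases List.mem_or_eq_of_mem_set hrm with h1 | h1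
  · exact hr r h1
  · subst h1
    rw [List.length_set]
    rw [List.getD_eq_getElem _ _ (by omega)]
    exact hr _ (List.getElem_mem (by omega))

lemma pvSetCoref_entry {n : Nat} {M : List (List String)} (h : pvDims n M)
    {i j a b : Nat} (hi : i < n) (hj : j < n) (ha : a < n) :
    pvEntry (pvSetCoref M (i : Int) (j : Int)) a b =
      if a = i ∧ b = j then "COREF" else pvEntry M a b := by
  obtain ⟨hl, hr⟩ := h
  rw [pvSetCoref_eq]
  unfold pvEntry
  rw [pvGetD_set]
  by_cases hai : i = a
  · subst hai
    rw [if_pos ⟨rfl, by omega⟩, pvGetD_set]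
    by_cases hbj : j = b
    · subst hbj
      have hjlen : (M.getD i []).length = n := by
        rw [List.getD_eq_getElem _ _ (by omega)]
        exact hr _ (List.getElem_mem (by omega))
      rw [if_pos ⟨rfl, by omega⟩, if_pos ⟨rfl, rfl⟩]
    · rw [if_neg (fun hh => hbj hh.1), if_neg (fun hh => hbj hh.2.symm)]
  · rw [if_neg (fun hh => hai hh.1), if_neg (fun hh => hai hh.1.symm)]

lemma pvStep_dims {n : Nat} {M : List (List String)} (h : pvDims n M)
    {p : List Int} (hp : ∃ i j : Nat, p = [(i : Int), (j : Int)] ∧ i < n ∧ j < n) :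
    pvDims n (pvStep M p) := by
  obtain ⟨i, j, rfl, hi, hj⟩ := hp
  exact pvSetCoref_dims (pvSetCoref_dims h hi j) hj i

lemma pvStep_entry {n : Nat} {M : List (List String)} (h : pvDims n M)
    {p : List Int} (hp : ∃ i j : Nat, p = [(i : Int), (j : Int)] ∧ i < n ∧ j < n)
    {a b : Nat} (ha : a < n) (hb : b < n) :
    pvEntry (pvStep M p) a b =
      if p = [(a : Int), (b : Int)] ∨ p = [(b : Int), (a : Int)] then "COREF"
      else pvEntry M a b := by
  obtain ⟨i, j, rfl, hi, hj⟩ := hp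
  show pvEntry (pvSetCoref (pvSetCoref M (i:Int) (j:Int)) (j:Int) (i:Int)) a b = _
  rw [pvSetCoref_entry (pvSetCoref_dims h hi j) hj hi ha,
      pvSetCoref_entry h hi hj ha]
  have hcast : ([(i:Int), (j:Int)] = [(a:Int), (b:Int)] ∨ [(i:Int), (j:Int)] = [(b:Int), (a:Int)])
      ↔ ((i = a ∧ j = b) ∨ (i = b ∧ j = a)) := by
    constructor
    · rintro (hh | hh) <;> [left; right] <;>
        (injection hh with h1 h2; injection h2 with h2 _; exact ⟨by exact_mod_cast h1, by exact_mod_cast h2⟩)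
    · rintro (⟨rfl, rfl⟩ | ⟨rfl, rfl⟩) <;> simp
  by_cases h1 : a = j ∧ b = i
  · rw [if_pos h1, if_pos (by right; simp [h1.1, h1.2])]
  · rw [if_neg h1]
    by_cases h2 : a = i ∧ b = j
    · rw [if_pos h2, if_pos (by left; simp [h2.1, h2.2])]
    · rw [if_neg h2, if_neg]
      rw [hcast]
      rintro (⟨rfl, rfl⟩ | ⟨rfl, rfl⟩)
      · exact h2 ⟨rfl, rfl⟩
      · exact h1 ⟨rfl, rfl⟩

lemma pvFold_dims {n : Nat} (P : List (List Int))
    (hP : ∀ p ∈ P, ∃ i j : Nat, p = [(i : Int), (j : Int)] ∧ i < n ∧ j < n)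
    {M : List (List String)} (h : pvDims n M) :
    pvDims n (P.foldl pvStep M) := by
  induction P generalizing M with
  | nil => exact h
  | cons p rest ih =>
    exact ih (fun q hq => hP q (List.mem_cons_of_mem _ hq))
      (pvStep_dims h (hP p (List.mem_cons_self ..)))

lemma pvFold_entry {n : Nat} (P : List (List Int))
    (hP : ∀ p ∈ P, ∃ i j : Nat, p = [(i : Int), (j : Int)] ∧ i < n ∧ j < n)
    {M : List (List String)} (h : pvDims n M) {a b : Nat} (ha : a < n) (hb : b < n) :
    pvEntry (P.foldl pvStep M) a b =
      if [(a : Int), (b : Int)] ∈ P ∨ [(b : Int), (a : Int)] ∈ P then "COREF"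
      else pvEntry M a b := by
  induction P generalizing M with
  | nil => simp
  | cons p rest ih =>
    rw [List.foldl_cons,
        ih (fun q hq => hP q (List.mem_cons_of_mem _ hq)) (pvStep_dims h (hP p (List.mem_cons_self ..))),
        pvStep_entry h (hP p (List.mem_cons_self ..)) ha hb]
    by_cases h1 : [(a : Int), (b : Int)] ∈ rest ∨ [(b : Int), (a : Int)] ∈ rest
    · rw [if_pos h1, if_pos (h1.imp (List.mem_cons_of_mem _) (List.mem_cons_of_mem _))]
    · rw [if_neg h1]
      by_cases h2 : p = [(a : Int), (b : Int)] ∨ p = [(b : Int), (a : Int)]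
      · rw [if_pos h2, if_pos (h2.imp (fun hh => hh ▸ List.mem_cons_self ..) (fun hh => hh ▸ List.mem_cons_self ..))]
      · rw [if_neg h2, if_neg]
        simp only [List.mem_cons]
        rintro ((hh | hh) | (hh | hh))
        · exact h2 (Or.inl hh.symm)
        · exact h1 (Or.inl hh)
        · exact h2 (Or.inr hh.symm)
        · exact h1 (Or.inr hh)

lemma pvClusters_fold_eq (entities : List (List (String × String))) :
    pvClusters entities =
      ((PySem.List.enumerate entities).map (fun p => (pvClusterId p.2, p.1))).foldl
        (fun d q => d.modify q.1 [] (· ++ [q.2])) PySem.Dict.empty := by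
  rw [List.foldl_map]; rfl

lemma pvClusters_getD (entities : List (List (String × String))) (c : String) :
    (pvClusters entities).getD c [] = pvGroup entities c := by
  rw [pvClusters_fold_eq, PySem.Dict.getD_foldl_modify_append]
  simp [pvGroup, List.filter_map, List.map_map, Function.comp_def]

lemma pvClusters_keys (entities : List (List (String × String))) :
    (pvClusters entities).keys = PySem.Set.ofList (entities.map pvClusterId) := by
  rw [pvClusters_fold_eq, PySem.Dict.keys_foldl_modify_key _ Prod.fst []
    (fun _ q => (· ++ [q.2]))]
  rw [List.map_map]
  have : (Prod.fst ∘ fun p : Int × List (String × String) => (pvClusterId p.2, p.1)) =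
      (fun p : Int × List (String × String) => pvClusterId p.2) := rfl
  rw [this]
  have h2 : (PySem.List.enumerate entities).map (fun p => pvClusterId p.2) =
      entities.map pvClusterId := by
    rw [show (fun p : Int × List (String × String) => pvClusterId p.2) =
      (pvClusterId ∘ fun p : Int × List (String × String) => p.2) from rfl, ← List.map_map,
      PySem.List.map_snd_enumerate]
  rw [h2]
  simp [PySem.Dict.keys, PySem.Dict.empty, PySem.Set.update_nil_left]

lemma pvClusters_keys_nodup (entities : List (List (String × String))) :
    (pvClusters entities).keys.Nodup := by
  rw [pvClusters_fold_eq]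
  exact PySem.Dict.nodup_keys_foldl_modify_key _ Prod.fst []
    (fun _ q => (· ++ [q.2])) PySem.Dict.empty (by simp [PySem.Dict.keys, PySem.Dict.empty])

lemma pvMem_group (entities : List (List (String × String))) (c : String) (x : Int) :
    x ∈ pvGroup entities c ↔
      ∃ k : Nat, ∃ hk : k < entities.length, x = (k : Int) ∧ pvClusterId entities[k] = c := by
  unfold pvGroup
  simp only [List.mem_map, List.mem_filter, PySem.List.mem_enumerate_iff]
  constructor
  · rintro ⟨p, ⟨⟨k, hk, rfl⟩, hc⟩, rfl⟩
    exact ⟨k, hk, by simp, by simpa using hc⟩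
  · rintro ⟨k, hk, rfl, hc⟩
    exact ⟨(0 + (k : Int), entities[k]), ⟨⟨k, hk, rfl⟩, by simpa using hc⟩, by simp⟩

lemma pvGroup_pairwise (entities : List (List (String × String))) (c : String) :
    (pvGroup entities c).Pairwise (· < ·) := by
  unfold pvGroup
  rw [List.pairwise_map]
  exact ((PySem.List.pairwise_lt_enumerate entities 0).sublist List.filter_sublist)

lemma pvPair_sublist {l : List Int} (h : l.Pairwise (· < ·)) {a b : Int}
    (ha : a ∈ l) (hb : b ∈ l) (hab : a < b) : [a, b].Sublist l := by
  induction l with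
  | nil => cases ha
  | cons x xs ih =>
    rcases List.mem_cons.mp ha with rfl | ha'
    · have hb' : b ∈ xs := by
        rcases List.mem_cons.mp hb with rfl | hb'
        · omega
        · exact hb'
      exact (List.singleton_sublist.mpr hb').cons₂ a
    · have hb' : b ∈ xs := by
        rcases List.mem_cons.mp hb with rfl | hb''
        · have := (List.pairwise_cons.mp h).1 a ha'; omega
        · exact hb''
      exact (ih (List.pairwise_cons.mp h).2 ha' hb').cons x

lemma pvClusters_items (entities : List (List (String × String))) :
    (pvClusters entities).items =
      (PySem.Set.ofList (entities.map pvClusterId)).map (fun c => (c, pvGroup entities c)) := by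
  rw [PySem.Dict.items_eq_map_keys _ (pvClusters_keys_nodup entities) [],
      pvClusters_keys]
  exact List.map_congr_left (fun c _ => by rw [pvClusters_getD])

lemma pvMem_pairs (entities : List (List (String × String))) (p : List Int) :
    p ∈ pvPairs entities ↔
      ∃ c ∈ PySem.Set.ofList (entities.map pvClusterId),
        p.Sublist (pvGroup entities c) ∧ p.length = 2 := by
  unfold pvPairs
  rw [pvClusters_items]
  simp only [List.mem_flatMap, List.mem_map, PySem.List.mem_combinations_iff]
  constructor
  · rintro ⟨pr, ⟨c, hc, rfl⟩, hsub, hlen⟩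
    exact ⟨c, hc, hsub, hlen⟩
  · rintro ⟨c, hc, hsub, hlen⟩
    exact ⟨(c, pvGroup entities c), ⟨c, hc, rfl⟩, hsub, hlen⟩

lemma pvPairs_shape (entities : List (List (String × String))) :
    ∀ p ∈ pvPairs entities,
      ∃ i j : Nat, p = [(i : Int), (j : Int)] ∧ i < entities.length ∧ j < entities.length := by
  intro p hp
  rw [pvMem_pairs] at hp
  obtain ⟨c, _, hsub, hlen⟩ := hp
  match p, hlen with
  | [x, y], _ =>
    have hx : x ∈ pvGroup entities c := hsub.mem (by simp)
    have hy : y ∈ pvGroup entities c := hsub.mem (by simp)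
    rw [pvMem_group] at hx hy
    obtain ⟨i, hi, rfl, _⟩ := hx
    obtain ⟨j, hj, rfl, _⟩ := hy
    exact ⟨i, j, rfl, hi, hj⟩

lemma pvCids_getD (entities : List (List (String × String))) {a : Nat}
    (ha : a < entities.length) :
    (entities.map pvClusterId).getD a "" = pvClusterId entities[a] := by
  rw [List.getD_eq_getElem _ _ (by simpa using ha)]
  simp

lemma pvPairs_mem_single (entities : List (List (String × String))) {a b : Nat}
    (ha : a < entities.length) (hb : b < entities.length) (hab : a < b)
    (hcid : pvClusterId entities[a] = pvClusterId entities[b]) :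
    [(a : Int), (b : Int)] ∈ pvPairs entities := by
  rw [pvMem_pairs]
  refine ⟨pvClusterId entities[a], ?_, ?_, rfl⟩
  · rw [PySem.Set.mem_ofList]
    exact List.mem_map_of_mem (List.getElem_mem ha)
  · apply pvPair_sublist (pvGroup_pairwise entities _)
    · rw [pvMem_group]; exact ⟨a, ha, rfl, rfl⟩
    · rw [pvMem_group]; exact ⟨b, hb, rfl, hcid.symm⟩
    · exact_mod_cast hab

lemma pvPairs_mem_iff (entities : List (List (String × String))) {a b : Nat}
    (ha : a < entities.length) (hb : b < entities.length) :
    ([(a : Int), (b : Int)] ∈ pvPairs entities ∨ [(b : Int), (a : Int)] ∈ pvPairs entities) ↔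
      (a ≠ b ∧ (entities.map pvClusterId).getD a "" = (entities.map pvClusterId).getD b "") := by
  rw [pvCids_getD entities ha, pvCids_getD entities hb]
  constructor
  · intro h
    have key : ∀ (x y : Nat) (hx : x < entities.length) (hy : y < entities.length),
        [(x : Int), (y : Int)] ∈ pvPairs entities →
        x ≠ y ∧ pvClusterId entities[x] = pvClusterId entities[y] := by
      intro x y hx hy hmem
      rw [pvMem_pairs] at hmem
      obtain ⟨c, _, hsub, _⟩ := hmem
      have hxm : (x : Int) ∈ pvGroup entities c := hsub.mem (by simp)
      have hym : (y : Int) ∈ pvGroup entities c := hsub.mem (by simp)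
      have hlt : (x : Int) < (y : Int) :=
        (List.pairwise_cons.mp (List.Pairwise.sublist hsub (pvGroup_pairwise entities c))).1 _ (by simp)
      rw [pvMem_group] at hxm hym
      obtain ⟨i, hi, hxi, hci⟩ := hxm
      obtain ⟨j, hj, hyj, hcj⟩ := hym
      have hxi' : x = i := by exact_mod_cast hxi
      have hyj' : y = j := by exact_mod_cast hyj
      subst hxi'; subst hyj'
      exact ⟨by omega, by rw [hci, hcj]⟩
    rcases h with h | h
    · exact key a b ha hb h
    · obtain ⟨hne, heq⟩ := key b a hb ha h
      exact ⟨hne.symm, heq.symm⟩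
  · rintro ⟨hne, heq⟩
    rcases Nat.lt_or_ge a b with hlt | hge
    · exact Or.inl (pvPairs_mem_single entities ha hb hlt heq)
    · have hlt : b < a := by omega
      exact Or.inr (pvPairs_mem_single entities hb ha hlt heq.symm)

lemma pvA_eq_fold (entities : List (List (String × String))) :
    get_coref_types entities =
      (pvPairs entities).foldl pvStep
        (List.replicate entities.length (List.replicate entities.length "O")) := by
  have hstep : (fun (labels : List (List String)) (c : List Int) =>
      match c with
      | [i, j] => pvSetCoref (pvSetCoref labels i j) j i
      | _ => labels) = pvStep := by
    funext labels c
    match c with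
    | [] => rfl
    | [_] => rfl
    | [_, _] => rfl
    | _ :: _ :: _ :: _ => rfl
  show (pvClusters entities).items.foldl _ _ = _
  rw [pvPairs, List.foldl_flatMap, hstep]

-- ===== VERDICT (by name: the statement is the Claim_ definition above) =====
theorem get_coref_types_spec : Claim_equal_get_coref_types := by
  intro entities _ _
  unfold Spec_get_coref_types
  have hM0 : pvDims entities.length
      (List.replicate entities.length (List.replicate entities.length "O")) := by
    constructor
    · simp
    · intro r hr
      rw [List.eq_of_mem_replicate hr]
      simp
  have hshape := pvPairs_shape entities
  have hdims := pvFold_dims (pvPairs entities) hshape hM0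
  have hlenB : (get_coref_types_alt entities).length = entities.length := by
    simp [get_coref_types_alt]
  rw [pvA_eq_fold]
  apply List.ext_getElem (by rw [hdims.1, hlenB])
  intro a h1 h2
  have ha : a < entities.length := by rw [← hdims.1]; exact h1
  have hrowA : (List.foldl pvStep (List.replicate entities.length (List.replicate entities.length "O")) (pvPairs entities))[a].length = entities.length :=
    hdims.2 _ (List.getElem_mem h1)
  apply List.ext_getElem (by rw [hrowA]; simp [get_coref_types_alt])
  intro b hb1 hb2
  have hbn : b < entities.length := by rw [← hrowA]; exact hb1
  have hA : (List.foldl pvStep (List.replicate entities.length (List.replicate entities.length "O")) (pvPairs entities))[a][b] =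
      pvEntry (List.foldl pvStep (List.replicate entities.length (List.replicate entities.length "O")) (pvPairs entities)) a b := by
    unfold pvEntry
    rw [List.getD_eq_getElem _ _ h1, List.getD_eq_getElem _ _ hb1]
  have hO : pvEntry (List.replicate entities.length (List.replicate entities.length "O")) a b = "O" := by
    unfold pvEntry
    rw [List.getD_eq_getElem (List.replicate entities.length (List.replicate entities.length "O")) [] (by simpa using ha),
        List.getElem_replicate,
        List.getD_eq_getElem (List.replicate entities.length "O") "" (by simpa using hbn),
        List.getElem_replicate]
  rw [hA, pvFold_entry (pvPairs entities) hshape hM0 ha hbn, hO]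
  simp only [get_coref_types_alt, List.getElem_map, List.getElem_range]
  by_cases hc : [(a : Int), (b : Int)] ∈ pvPairs entities ∨ [(b : Int), (a : Int)] ∈ pvPairs entities
  · rw [if_pos hc, if_pos ((pvPairs_mem_iff entities ha hbn).mp hc)]
  · rw [if_neg hc, if_neg (fun hh => hc ((pvPairs_mem_iff entities ha hbn).mpr hh))]
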